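-- pv_equiv track=rewrite | github.com/the0s/solutions | Python/ways_to_climp_steps.py | stepping
-- ===== SOURCE A (Python) =====
-- def check(i, n, process, pos):
--     pos += i
--     if pos <= n:
--         process.append(i)
--     elif pos > n:
--         process = []
--     return process, pos
--
-- def stepping(start, n, process, pos):
--     sls = []
--     for i in range(start, n+1):
--         init = process.copy()
--         init_pos = pos
--         init, init_pos = check(i, n, init, init_pos)
--         if init and init_pos == n and init not in sls:
--             sls.append(init)
--         elif init_pos < n:
--             res = stepping(start, n, init, init_pos)
--             sls += res
--         else:
--             break
--     return sls
-- ===== SOURCE B (Python) =====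
-- def stepping(start, n, process, pos):
--     # Iterative DFS with an explicit stack (no recursion, no dedup check).
--     # Frames are (path, position); the stack is pushed in descending step
--     # order so that popping explores steps in ascending order, which
--     # reproduces the recursive pre-order exactly.
--     out = []
--     hi = min(n, n - pos)
--     stack = [(process + [i], pos + i) for i in range(hi, start - 1, -1)]
--     while stack:
--         p, q = stack.pop()
--         if q == n:
--             out.append(p)
--         else:
--             h = min(n, n - q)
--             stack.extend((p + [i], q + i) for i in range(h, start - 1, -1))
--     return out
-- ===== Notes on version B (the rewrite author's own statement) =====
-- stated objective: alternative
-- what changed: Replaces the recursive DFS with its per-call check() helper and dead 'init not in sls' dedup by an iterative worklist DFS over an explicit stack of (path, position) frames, computing each frame's admissible step range in closed form (min(n, n-pos)) instead of breaking out of a scan.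
import Mathlib
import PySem

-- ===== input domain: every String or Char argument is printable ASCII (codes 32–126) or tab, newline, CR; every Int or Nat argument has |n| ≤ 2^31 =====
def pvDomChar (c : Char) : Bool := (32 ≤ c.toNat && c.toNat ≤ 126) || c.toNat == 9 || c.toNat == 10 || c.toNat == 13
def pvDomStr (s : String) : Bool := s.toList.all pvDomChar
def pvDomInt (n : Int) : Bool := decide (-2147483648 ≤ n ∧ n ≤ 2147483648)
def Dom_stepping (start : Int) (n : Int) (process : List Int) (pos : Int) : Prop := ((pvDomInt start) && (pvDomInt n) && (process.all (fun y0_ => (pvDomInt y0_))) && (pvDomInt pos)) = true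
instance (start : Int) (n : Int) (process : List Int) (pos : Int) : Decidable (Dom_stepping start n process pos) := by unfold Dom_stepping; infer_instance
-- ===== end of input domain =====

-- B replaces the recursive DFS (helper check(), dead 'not in sls' dedup) by an
-- iterative explicit-stack DFS computing each frame's step range in closed form.

-- ===== PORT A =====
-- helper check(i, n, process, pos)
def pvCheck (i n : Int) (process : List Int) (pos : Int) : List Int × Int :=
  let pos' := pos + i
  (if pos' ≤ n then process ++ [i] else [], pos')

-- A recurses; on inputs outside Pre_ the Python recursion never terminates
-- (RecursionError), so the port carries a fuel argument; under Pre_ the fuel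
-- (n - pos).toNat + 1 is sufficient (proved below), so the fuel is only a
-- totality guard, never reached inside Pre_.
mutual
def steppingF (f : Nat) (start n : Int) (process : List Int) (pos : Int) : List (List Int) :=
  match f with
  | 0 => []
  | Nat.succ f' => loopA f' start n process pos (PySem.List.pyRange start (n+1) 1) []
termination_by (f, 0)

def loopA (f : Nat) (start n : Int) (process : List Int) (pos : Int) : List Int → List (List Int) → List (List Int)
  | [], sls => sls
  | i :: rest, sls =>
    let c := pvCheck i n process pos
    if c.1 ≠ [] ∧ c.2 = n ∧ c.1 ∉ sls then
      loopA f start n process pos rest (sls ++ [c.1])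
    else if c.2 < n then
      loopA f start n process pos rest (sls ++ steppingF f start n c.1 c.2)
    else sls
termination_by l _ => (f, l.length + 1)
end

def stepping (start : Int) (n : Int) (process : List Int) (pos : Int) : List (List Int) :=
  steppingF ((n - pos).toNat + 1) start n process pos

-- ===== PORT B =====
-- Source B pushes frames with a DESCENDING range and pops from the right end of the
-- list; the port keeps the stack reversed (head = top of stack), so pushing the
-- descending generator becomes prepending the ASCENDING range — same stack.
-- The while loop carries a fuel; sum of 2^(n-q) over initial frames is enough
-- (proved below), so inside Pre_ the fuel guard is never reached.
def altLoop (start n : Int) (f : Nat) (stack : List (List Int × Int)) (out : List (List Int)) : List (List Int) :=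
  match f, stack with
  | _, [] => out
  | 0, _ :: _ => out
  | Nat.succ f', (p, q) :: rest =>
    if q = n then altLoop start n f' rest (out ++ [p])
    else altLoop start n f'
      ((PySem.List.pyRange start (min n (n - q) + 1) 1).map (fun i => (p ++ [i], q + i)) ++ rest) out

def stepping_alt (start : Int) (n : Int) (process : List Int) (pos : Int) : List (List Int) :=
  let stack0 := (PySem.List.pyRange start (min n (n - pos) + 1) 1).map
    (fun i => (process ++ [i], pos + i))
  altLoop start n ((stack0.map (fun fr => 2 ^ (n - fr.2).toNat)).sum) stack0 []

-- ===== PRECONDITION & SPEC =====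
-- Pre_ excludes exactly the inputs on which Python A raises RecursionError:
-- when start ≤ 0 with start ≤ n and pos + start < n the recursion never
-- terminates, and when the recursion depth ~ (n - pos)/start reaches the
-- interpreter's recursion limit it raises too; n - pos < 900 * start is a
-- conservative bound safely under CPython's default limit of 1000.
def Pre_stepping (start : Int) (n : Int) (process : List Int) (pos : Int) : Prop :=
  (1 ≤ start ∧ n - pos < 900 * start) ∨ n < start ∨ n ≤ pos + start

instance (start : Int) (n : Int) (process : List Int) (pos : Int) : Decidable (Pre_stepping start n process pos) := by unfold Pre_stepping; infer_instance

def pvWitness_stepping : Int × Int × List Int × Int := (1, 4, [], 0)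

def Spec_stepping (start : Int) (n : Int) (process : List Int) (pos : Int) (out : List (List Int)) : Prop := out = stepping_alt start n process pos
instance (start : Int) (n : Int) (process : List Int) (pos : Int) (out : List (List Int)) : Decidable (Spec_stepping start n process pos out) := by unfold Spec_stepping; infer_instance

-- ===== CLAIM (what is proved, stated in full; the proofs are below) =====
def Claim_equal_stepping : Prop := ∀ (start : Int) (n : Int) (process : List Int) (pos : Int), Dom_stepping start n process pos → Pre_stepping start n process pos → Spec_stepping start n process pos (stepping start n process pos)

-- ===== LEMMAS AND PROOFS =====

-- Common specification: pvS start n d j q = the list of step tails produced by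
-- the loop scanning i = j, j+1, …, n at position q (d = depth budget).
def pvS (start n : Int) : Nat → Int → Int → List (List Int)
  | d, j, q =>
    (PySem.List.pyRange j (n+1) 1).flatMap (fun i =>
      if q + i = n then [[i]]
      else if q + i < n then
        ((match d with
          | 0 => ([] : List (List Int))
          | Nat.succ d' => pvS start n d' start (q+i))).map (fun t => i :: t)
      else [])

lemma pvS_eq_flatMap (start n : Int) (d : Nat) (j q : Int) :
    pvS start n d j q = (PySem.List.pyRange j (n+1) 1).flatMap (fun i =>
      if q + i = n then [[i]]
      else if q + i < n then
        ((match d with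
          | 0 => ([] : List (List Int))
          | Nat.succ d' => pvS start n d' start (q+i))).map (fun t => i :: t)
      else []) := by
  cases d <;> rfl

lemma pvS_nil (start n : Int) (d : Nat) (j q : Int) (h : n < j) :
    pvS start n d j q = [] := by
  rw [pvS_eq_flatMap, PySem.List.pyRange_one_eq_nil (by omega)]
  rfl

lemma pvS_nil_of_over (start n : Int) (d : Nat) (j q : Int) (h : n < q + j) :
    pvS start n d j q = [] := by
  rw [pvS_eq_flatMap]
  rw [List.flatMap_congr (g := fun _ => ([] : List (List Int))) ?_]
  · simp
  · intro i hi
    rw [PySem.List.mem_pyRange_one] at hi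
    have h1 : ¬ (q + i = n) := by omega
    have h2 : ¬ (q + i < n) := by omega
    simp [h1, h2]

lemma pvS_cons (start n : Int) (d : Nat) (j q : Int) (h : j ≤ n) :
    pvS start n d j q =
      (if q + j = n then [[j]]
       else if q + j < n then
        ((match d with
          | 0 => ([] : List (List Int))
          | Nat.succ d' => pvS start n d' start (q+j))).map (fun t => j :: t)
       else []) ++ pvS start n d (j+1) q := by
  rw [pvS_eq_flatMap, pvS_eq_flatMap, PySem.List.pyRange_one_cons (by omega)]
  simp [List.flatMap_cons]

lemma pvS_cons_rec (start n : Int) (d : Nat) (j q : Int) (h : j ≤ n) (h1 : q + j < n) :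
    pvS start n (d+1) j q
      = (pvS start n d start (q+j)).map (fun t => j :: t) ++ pvS start n (d+1) (j+1) q := by
  rw [pvS_cons start n (d+1) j q h, if_neg (by omega), if_pos h1]

lemma pvS_stable (start n : Int) (hs : 1 ≤ start) :
    ∀ (d e : Nat) (j q : Int), 1 ≤ j → (n - q).toNat ≤ d → (n - q).toNat ≤ e →
      pvS start n d j q = pvS start n e j q := by
  intro d
  induction d with
  | zero =>
    intro e j q hj hd he
    rw [pvS_eq_flatMap, pvS_eq_flatMap]
    refine List.flatMap_congr ?_
    intro i hi
    rw [PySem.List.mem_pyRange_one] at hi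
    have h2 : ¬ (q + i < n) := by omega
    simp [h2]
  | succ d ih =>
    intro e j q hj hd he
    rw [pvS_eq_flatMap, pvS_eq_flatMap]
    refine List.flatMap_congr ?_
    intro i hi
    rw [PySem.List.mem_pyRange_one] at hi
    by_cases h1 : q + i = n
    · simp [h1]
    · by_cases h2 : q + i < n
      · have hi1 : 1 ≤ i := by omega
        have hnq : 2 ≤ n - q := by omega
        cases e with
        | zero => omega
        | succ e' =>
          have := ih e' start (q + i) hs (by omega) (by omega)
          simp [this]
      · simp [h1, h2]

-- A's loop computes pvS (given enough fuel on recursive calls)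
lemma loopA_eq (start n : Int) (hs : 1 ≤ start) (f : Nat)
    (Hf : ∀ (p : List Int) (q : Int), (n - q).toNat < f →
      steppingF f start n p q = (pvS start n ((n - q).toNat) start q).map (fun t => p ++ t)) :
    ∀ (k : Nat) (j : Int) (p : List Int) (q : Int) (sls : List (List Int)),
      (n + 1 - j).toNat = k → start ≤ j → (n - q).toNat ≤ f →
      (∀ x ∈ sls, ∃ i' t, x = p ++ i' :: t ∧ i' < j) →
      loopA f start n p q (PySem.List.pyRange j (n+1) 1) sls
        = sls ++ (pvS start n ((n - q).toNat) j q).map (fun t => p ++ t) := by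
  intro k
  induction k with
  | zero =>
    intro j p q sls hk hj hf hinv
    rw [PySem.List.pyRange_one_eq_nil (by omega), loopA,
      pvS_nil start n _ j q (by omega)]
    simp
  | succ k ih =>
    intro j p q sls hk hj hf hinv
    have hjn : j ≤ n := by omega
    have hj1 : 1 ≤ j := le_trans hs hj
    rw [PySem.List.pyRange_one_cons (by omega : j < n+1), loopA]
    by_cases h1 : q + j = n
    · have hle : q + j ≤ n := by omega
      have init_eq : pvCheck j n p q = (p ++ [j], q + j) := by
        simp [pvCheck, hle]
      simp only [init_eq]
      have hcond : (p ++ [j] ≠ [] ∧ q + j = n ∧ p ++ [j] ∉ sls) := by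
        refine ⟨by simp, h1, ?_⟩
        intro hmem
        obtain ⟨i', t, hx, hlt⟩ := hinv _ hmem
        have : ([j] : List Int) = i' :: t := List.append_cancel_left hx
        have : i' = j := by
          have := (List.cons.injEq j [] i' t).mp this
          exact this.1.symm
        omega
      rw [if_pos hcond]
      rw [ih (j+1) p q (sls ++ [p ++ [j]]) (by omega) (by omega) hf ?_]
      · rw [pvS_cons start n _ j q hjn]
        simp only [h1, if_pos]
        simp
      · intro x hx
        rcases List.mem_append.mp hx with hx | hx
        · obtain ⟨i', t, hxe, hlt⟩ := hinv _ hx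
          exact ⟨i', t, hxe, by omega⟩
        · simp only [List.mem_singleton] at hx
          exact ⟨j, [], by simp [hx], by omega⟩
    · by_cases h2 : q + j < n
      · have hle : q + j ≤ n := by omega
        have init_eq : pvCheck j n p q = (p ++ [j], q + j) := by
          simp [pvCheck, hle]
        simp only [init_eq]
        rw [if_neg (by simp [h1]), if_pos h2]
        have hbound : (n - (q + j)).toNat < f := by omega
        rw [Hf (p ++ [j]) (q + j) hbound]
        rw [ih (j+1) p q _ (by omega) (by omega) hf ?_]
        · rcases hd : (n - q).toNat with _ | d0
          · omega
          · rw [pvS_cons_rec start n d0 j q hjn h2]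
            have hstab : pvS start n d0 start (q + j)
                = pvS start n ((n - (q + j)).toNat) start (q + j) :=
              pvS_stable start n hs d0 _ start (q + j) hs (by omega) (by omega)
            rw [hstab, List.map_append, ← List.append_assoc, List.map_map]
            congr 2
            apply List.map_congr_left
            intro t _
            simp
        · intro x hx
          rcases List.mem_append.mp hx with hx | hx
          · obtain ⟨i', t, hxe, hlt⟩ := hinv _ hx
            exact ⟨i', t, hxe, by omega⟩
          · simp only [List.mem_map] at hx
            obtain ⟨t, _, hxe⟩ := hx
            exact ⟨j, t, by simp [← hxe], by omega⟩
      · have hgt : n < q + j := by omega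
        have init_eq : pvCheck j n p q = ([], q + j) := by
          simp [pvCheck]; omega
        simp only [init_eq]
        rw [if_neg (by simp), if_neg (by simpa using h2)]
        rw [pvS_nil_of_over start n _ j q hgt]
        simp

lemma steppingF_eq (start n : Int) (hs : 1 ≤ start) :
    ∀ (f : Nat) (p : List Int) (q : Int), (n - q).toNat < f →
      steppingF f start n p q = (pvS start n ((n - q).toNat) start q).map (fun t => p ++ t) := by
  intro f
  induction f with
  | zero => intro p q h; omega
  | succ f ih =>
    intro p q h
    rw [steppingF]
    rw [loopA_eq start n hs f ih ((n + 1 - start).toNat) start p q []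
      rfl le_rfl (by omega) (by intro x hx; simp at hx)]
    simp

-- B-side: the value contributed by one stack frame
def pvFrameRes (start n : Int) (fr : List Int × Int) : List (List Int) :=
  if fr.2 = n then [fr.1]
  else (pvS start n ((n - fr.2).toNat) start fr.2).map (fun t => fr.1 ++ t)

-- expanding a frame's children is exactly its pvS value
lemma expand_eq (start n : Int) (hs : 1 ≤ start) (p : List Int) (q : Int) (hq : q < n) :
    ((PySem.List.pyRange start (min n (n - q) + 1) 1).map
        (fun i => (p ++ [i], q + i))).flatMap (pvFrameRes start n)
      = (pvS start n ((n - q).toNat) start q).map (fun t => p ++ t) := by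
  rcases hd : (n - q).toNat with _ | d0
  · omega
  · rw [List.flatMap_map, pvS_eq_flatMap, List.map_flatMap]
    by_cases hsp : start ≤ min n (n - q) + 1
    · rw [PySem.List.pyRange_one_append start (min n (n - q) + 1) (n+1) hsp (by omega),
        List.flatMap_append]
      have htail : (PySem.List.pyRange (min n (n - q) + 1) (n+1) 1).flatMap
          (fun i => (if q + i = n then [[i]]
            else if q + i < n then
              ((match d0 + 1 with
                | 0 => ([] : List (List Int))
                | Nat.succ d' => pvS start n d' start (q+i))).map (fun t => i :: t)
            else []).map (fun t => p ++ t)) = [] := by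
        rw [List.flatMap_congr (g := fun _ => ([] : List (List Int))) ?_]
        · simp
        · intro i hi
          rw [PySem.List.mem_pyRange_one] at hi
          have hgt : n < q + i := by omega
          rw [if_neg (by omega), if_neg (by omega)]
          rfl
      rw [htail, List.append_nil]
      refine List.flatMap_congr ?_
      intro i hi
      rw [PySem.List.mem_pyRange_one] at hi
      have hle : q + i ≤ n := by omega
      by_cases h1 : q + i = n
      · simp [pvFrameRes, h1]
      · have h2 : q + i < n := by omega
        have hstab : pvS start n d0 start (q + i)
            = pvS start n ((n - (q + i)).toNat) start (q + i) :=
          pvS_stable start n hs d0 _ start (q + i) hs (by omega) (by omega)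
        rw [if_neg h1, if_pos h2]
        simp only [pvFrameRes, h1, if_false]
        rw [← hstab, List.map_map]
        refine List.map_congr_left ?_
        intro t _
        simp
    · rw [PySem.List.pyRange_one_eq_nil (by omega : min n (n - q) + 1 ≤ start)]
      symm
      simp only [List.flatMap_nil, List.flatMap_eq_nil_iff]
      intro x hx
      rw [PySem.List.mem_pyRange_one] at hx
      rw [if_neg (by omega), if_neg (by omega)]
      rfl

lemma geo_sum (n q : Int) (hq : q < n) :
    ∀ (k : Nat) (j : Int), 1 ≤ j → (min n (n - q) + 1 - j).toNat = k →
      ((PySem.List.pyRange j (min n (n - q) + 1) 1).map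
          (fun i => 2 ^ (n - (q + i)).toNat)).sum + 1 ≤ 2 ^ ((n - q - j + 1).toNat) := by
  intro k
  induction k with
  | zero =>
    intro j hj hk
    rw [PySem.List.pyRange_one_eq_nil (by omega)]
    simpa using Nat.one_le_two_pow
  | succ k ih =>
    intro j hj hk
    have hjm : j ≤ min n (n - q) := by omega
    rw [PySem.List.pyRange_one_cons (by omega)]
    have hrec := ih (j+1) (by omega) (by omega)
    have he1 : (n - (q + j)).toNat = (n - q - j).toNat := by omega
    have he2 : (n - q - (j+1) + 1).toNat = (n - q - j).toNat := by omega
    have he3 : (n - q - j + 1).toNat = (n - q - j).toNat + 1 := by omega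
    rw [he2] at hrec
    rw [List.map_cons, List.sum_cons, he1, he3, pow_succ]
    omega

lemma altLoop_eq (start n : Int) (hs : 1 ≤ start) :
    ∀ (f : Nat) (stack : List (List Int × Int)) (out : List (List Int)),
      (∀ fr ∈ stack, fr.2 ≤ n) →
      (stack.map (fun fr => 2 ^ (n - fr.2).toNat)).sum ≤ f →
      altLoop start n f stack out = out ++ stack.flatMap (pvFrameRes start n) := by
  intro f
  induction f with
  | zero =>
    intro stack out hfr hw
    cases stack with
    | nil => simp [altLoop]
    | cons fr rest =>
      exfalso
      have h1 : 1 ≤ 2 ^ (n - fr.2).toNat := Nat.one_le_two_pow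
      simp only [List.map_cons, List.sum_cons] at hw
      omega
  | succ f ih =>
    intro stack out hfr hw
    cases stack with
    | nil => simp [altLoop]
    | cons fr rest =>
      obtain ⟨p, q⟩ := fr
      have hqn : q ≤ n := hfr (p, q) (List.mem_cons_self ..)
      simp only [List.map_cons, List.sum_cons] at hw
      by_cases hq : q = n
      · rw [altLoop, if_pos hq]
        rw [ih rest (out ++ [p]) (fun fr h => hfr fr (List.mem_cons_of_mem _ h))
          (by
            subst hq
            simp only [Int.sub_self, Int.toNat_zero, pow_zero] at hw
            omega)]
        simp [pvFrameRes, hq]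
      · have hqlt : q < n := lt_of_le_of_ne hqn hq
        rw [altLoop, if_neg hq]
        have hkids : ∀ fr ∈ (PySem.List.pyRange start (min n (n - q) + 1) 1).map
            (fun i => (p ++ [i], q + i)), fr.2 ≤ n := by
          intro fr hfr'
          simp only [List.mem_map] at hfr'
          obtain ⟨i, hi, hfe⟩ := hfr'
          rw [PySem.List.mem_pyRange_one] at hi
          subst hfe
          simp only
          omega
        have hgeo := geo_sum n q hqlt ((min n (n - q) + 1 - start).toNat) start hs rfl
        have hmono : 2 ^ ((n - q - start + 1).toNat) ≤ 2 ^ ((n - q).toNat) :=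
          Nat.pow_le_pow_right (by norm_num) (by omega)
        have hwk : ((((PySem.List.pyRange start (min n (n - q) + 1) 1).map
              (fun i => (p ++ [i], q + i)) ++ rest).map
                (fun fr => 2 ^ (n - fr.2).toNat)).sum) ≤ f := by
          rw [List.map_append, List.sum_append, List.map_map]
          have : ((PySem.List.pyRange start (min n (n - q) + 1) 1).map
              ((fun fr => 2 ^ (n - fr.2).toNat) ∘ fun i => (p ++ [i], q + i))).sum
              = ((PySem.List.pyRange start (min n (n - q) + 1) 1).map
                (fun i => 2 ^ (n - (q + i)).toNat)).sum := by
            refine congrArg List.sum (List.map_congr_left ?_)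
            intro i _
            rfl
          rw [this]
          omega
        rw [ih _ out (by
          intro fr hfr'
          rcases List.mem_append.mp hfr' with h | h
          · exact hkids fr h
          · exact hfr fr (List.mem_cons_of_mem _ h)) hwk]
        rw [List.flatMap_append, expand_eq start n hs p q hqlt]
        simp [pvFrameRes, hq]

-- corner-case helpers for the final theorem
lemma stepping_nil_of_gt (start n : Int) (process : List Int) (pos : Int) (h : n < start) :
    stepping start n process pos = [] := by
  unfold stepping
  rw [steppingF, PySem.List.pyRange_one_eq_nil (by omega), loopA]

lemma stepping_break (start n : Int) (process : List Int) (pos : Int)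
    (hsn : start ≤ n) (hgt : n < pos + start) : stepping start n process pos = [] := by
  unfold stepping
  rw [steppingF, PySem.List.pyRange_one_cons (by omega : start < n+1), loopA]
  have hceq : pvCheck start n process pos = ([], pos + start) := by
    simp only [pvCheck]
    rw [if_neg (by omega)]
  simp only [hceq]
  rw [if_neg (by simp), if_neg (by simp; omega)]

lemma stepping_alt_nil (start n : Int) (process : List Int) (pos : Int)
    (h : min n (n - pos) + 1 ≤ start) : stepping_alt start n process pos = [] := by
  simp only [stepping_alt]
  rw [PySem.List.pyRange_one_eq_nil h]
  simp [altLoop]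

-- ===== VERDICT (by name: the statement is the Claim_ definition above) =====
theorem stepping_spec : Claim_equal_stepping := by
  intro start n process pos _ hpre
  unfold Spec_stepping
  by_cases hs : 1 ≤ start
  · by_cases hpos : pos < n
    · have hA : stepping start n process pos
          = (pvS start n ((n - pos).toNat) start pos).map (fun t => process ++ t) := by
        unfold stepping
        exact steppingF_eq start n hs _ process pos (by omega)
      have hB : stepping_alt start n process pos
          = (pvS start n ((n - pos).toNat) start pos).map (fun t => process ++ t) := by
        simp only [stepping_alt]
        rw [altLoop_eq start n hs _ _ [] ?_ le_rfl]
        · rw [List.nil_append, expand_eq start n hs process pos hpos]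
        · intro fr hfr
          simp only [List.mem_map] at hfr
          obtain ⟨i, hi, hfe⟩ := hfr
          rw [PySem.List.mem_pyRange_one] at hi
          subst hfe
          simp only
          omega
      rw [hA, hB]
    · have hB := stepping_alt_nil start n process pos (by omega)
      by_cases hsn : start ≤ n
      · rw [stepping_break start n process pos hsn (by omega), hB]
      · rw [stepping_nil_of_gt start n process pos (by omega), hB]
  · rcases hpre with h | h | h
    · exact absurd h.1 hs
    · rw [stepping_nil_of_gt start n process pos h,
        stepping_alt_nil start n process pos (by omega)]
    · by_cases hsn : n < start
      · rw [stepping_nil_of_gt start n process pos hsn,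
          stepping_alt_nil start n process pos (by omega)]
      · by_cases heq : pos + start = n
        · have hA : stepping start n process pos = [process ++ [start]] := by
            unfold stepping
            rw [steppingF, PySem.List.pyRange_one_cons (by omega : start < n+1), loopA]
            have hceq : pvCheck start n process pos = (process ++ [start], pos + start) := by
              simp only [pvCheck]
              rw [if_pos (by omega)]
            simp only [hceq]
            rw [if_pos ⟨by simp, by omega, by simp⟩]
            by_cases h2 : start + 1 ≤ n
            · rw [PySem.List.pyRange_one_cons (by omega), loopA]
              have hceq2 : pvCheck (start+1) n process pos = ([], pos + (start+1)) := by
                simp only [pvCheck]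
                rw [if_neg (by omega)]
              simp only [hceq2]
              rw [if_neg (by simp), if_neg (by simp; omega)]
              simp
            · rw [PySem.List.pyRange_one_eq_nil (by omega), loopA]
              simp
          have hB : stepping_alt start n process pos = [process ++ [start]] := by
            simp only [stepping_alt]
            have hmin : min n (n - pos) = start := by omega
            rw [hmin, PySem.List.pyRange_one_singleton]
            simp [altLoop, heq]
          rw [hA, hB]
        · rw [stepping_break start n process pos (by omega) (by omega),
            stepping_alt_nil start n process pos (by omega)]
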